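-- pv_equiv track=rewrite | github.com/ThalesDaviSouza/ALG | TP3/combiner.py | get_conflicts_right
-- ===== SOURCE A (Python) =====
-- def get_conflicts_right(nLeft, adj, mapLeft, mapRight):
--   conflictsRight = [0] * nLeft
--
--   for iLeft, verticeLeft in enumerate(mapLeft):
--     mask = 0
--     for jRight, verticeRight in enumerate(mapRight):
--       # Verifica se há conflito entre vértice da esquerda e vértice da direita
--       if (adj[verticeLeft] >> verticeRight) & 1:
--         # Seta bit na posição j para indicar conflito
--         mask |= (1 << jRight)
--     conflictsRight[iLeft] = mask
--
--   return conflictsRight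
-- ===== SOURCE B (Python) =====
-- def get_conflicts_right(nLeft, adj, mapLeft, mapRight):
--   # Invert the traversal: index right positions by vertex value once, then
--   # gather over the set bits of each left vertex's adjacency mask.
--   rightMask = {}
--   for jRight, verticeRight in enumerate(mapRight):
--     rightMask[verticeRight] = rightMask.get(verticeRight, 0) | (1 << jRight)
--
--   def gather(bits):
--     mask = 0
--     for pos in range(bits.bit_length()):
--       if (bits >> pos) & 1:
--         mask |= rightMask.get(pos, 0)
--     return mask
--
--   res = [gather(adj[verticeLeft]) for verticeLeft in mapLeft]
--   return res + [0] * (nLeft - len(res))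
-- ===== Notes on version B (the rewrite author's own statement) =====
-- stated objective: alternative
-- what changed: B builds a dict from right-vertex value to the OR of position bits in one pass over mapRight, then for each left vertex scans only the bits of adj[verticeLeft] (up to bit_length) and ORs the indexed masks, instead of probing every right position per left vertex.
-- outside the precondition, e.g. on get_conflicts_right(1, [-2], [0], [5]): A returns [1], B returns [0]
import Mathlib
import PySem

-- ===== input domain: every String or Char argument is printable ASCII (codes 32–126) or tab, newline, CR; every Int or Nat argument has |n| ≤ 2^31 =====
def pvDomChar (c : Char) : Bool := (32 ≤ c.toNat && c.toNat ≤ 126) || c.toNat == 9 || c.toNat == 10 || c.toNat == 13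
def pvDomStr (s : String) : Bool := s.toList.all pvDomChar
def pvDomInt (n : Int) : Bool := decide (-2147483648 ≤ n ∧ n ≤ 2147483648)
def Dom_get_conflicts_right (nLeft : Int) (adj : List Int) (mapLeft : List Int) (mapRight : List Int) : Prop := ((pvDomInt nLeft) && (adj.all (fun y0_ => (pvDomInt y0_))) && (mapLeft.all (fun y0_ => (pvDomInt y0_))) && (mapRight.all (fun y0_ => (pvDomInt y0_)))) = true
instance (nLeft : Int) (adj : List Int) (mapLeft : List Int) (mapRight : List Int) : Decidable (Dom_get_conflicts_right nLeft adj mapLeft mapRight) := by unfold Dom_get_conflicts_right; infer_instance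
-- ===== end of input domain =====

-- B replaces A's per-left-vertex scan of every right position by a value→position-bits
-- dict over mapRight plus a scan of the set bits of adj[verticeLeft]; same results, proved equal.

-- ===== PORT A =====
-- Literal port of A.  adj[verticeLeft] is PySem.List.pyGet? (some under Pre_); the shift
-- (adj[vL] >> vR) & 1 is computed on Nat via .toNat, exact because Pre_ makes both operands
-- nonnegative, and 1 << jRight uses jRight.toNat, exact because enumerate indices are ≥ 0.
def get_conflicts_right (nLeft : Int) (adj : List Int) (mapLeft : List Int) (mapRight : List Int) : List Int :=
  let conflictsRight := List.replicate nLeft.toNat (0 : Int)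
  (PySem.List.enumerate mapLeft 0).foldl (fun conflictsRight p =>
    let a := ((PySem.List.pyGet? adj p.2).getD 0).toNat
    let mask := (PySem.List.enumerate mapRight 0).foldl (fun mask q =>
      if (a >>> q.2.toNat) &&& 1 = 1 then mask ||| ((1 : Nat) <<< q.1.toNat) else mask) (0 : Nat)
    conflictsRight.set p.1.toNat (Int.ofNat mask)) conflictsRight

-- ===== PORT B =====
-- Python's n.bit_length() for n ≥ 0
def pyBitLength (n : Nat) : Nat := if n = 0 then 0 else Nat.log2 n + 1

-- the dict rightMask of Source B: right-vertex value ↦ OR of (1 << jRight) over its positions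
def rightMaskOf (mapRight : List Int) : PySem.Dict Int Nat :=
  (PySem.List.enumerate mapRight 0).foldl
    (fun d q => d.insert q.2 (d.getD q.2 0 ||| ((1 : Nat) <<< q.1.toNat))) PySem.Dict.empty

-- the inner function 'gather' of Source B
def gatherMask (rightMask : PySem.Dict Int Nat) (bits : Nat) : Nat :=
  (List.range (pyBitLength bits)).foldl (fun mask pos =>
    if (bits >>> pos) &&& 1 = 1 then mask ||| rightMask.getD (Int.ofNat pos) 0 else mask) 0

-- Literal port of Source B (same .toNat notes as for A, exact under Pre_)
def get_conflicts_right_alt (nLeft : Int) (adj : List Int) (mapLeft : List Int) (mapRight : List Int) : List Int :=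
  let rightMask := rightMaskOf mapRight
  let res := mapLeft.map (fun verticeLeft =>
    Int.ofNat (gatherMask rightMask ((PySem.List.pyGet? adj verticeLeft).getD 0).toNat))
  res ++ List.replicate (nLeft - (res.length : Int)).toNat (0 : Int)

-- ===== PRECONDITION & SPEC =====
-- Pre_ excludes the inputs where A raises (mapLeft longer than nLeft → IndexError on assignment,
-- a left vertex indexing adj out of range → IndexError, a negative right vertex → ValueError on
-- the negative shift), and also inputs where an accessed adjacency value is negative, where A's
-- mask relies on Python's infinite two's-complement sign extension which B's bit_length scan
-- does not reproduce (see claim.json cites).  '0 ≤ (pyGet? adj v).getD (-1)' says exactly: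
-- adj[v] exists and is nonnegative.  When mapLeft is empty A touches nothing and returns.
def Pre_get_conflicts_right (nLeft : Int) (adj : List Int) (mapLeft : List Int) (mapRight : List Int) : Prop :=
  mapLeft = [] ∨
    ((mapLeft.length : Int) ≤ nLeft ∧
     (∀ v ∈ mapLeft, 0 ≤ (PySem.List.pyGet? adj v).getD (-1)) ∧
     (∀ r ∈ mapRight, 0 ≤ r))
instance (nLeft : Int) (adj : List Int) (mapLeft : List Int) (mapRight : List Int) : Decidable (Pre_get_conflicts_right nLeft adj mapLeft mapRight) := by unfold Pre_get_conflicts_right; infer_instance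

def pvWitness_get_conflicts_right : Int × List Int × List Int × List Int := (2, [1, 2, 4], [0, 2], [0, 1, 2])

def Spec_get_conflicts_right (nLeft : Int) (adj : List Int) (mapLeft : List Int) (mapRight : List Int) (out : List Int) : Prop := out = get_conflicts_right_alt nLeft adj mapLeft mapRight
instance (nLeft : Int) (adj : List Int) (mapLeft : List Int) (mapRight : List Int) (out : List Int) : Decidable (Spec_get_conflicts_right nLeft adj mapLeft mapRight out) := by unfold Spec_get_conflicts_right; infer_instance

-- ===== CLAIM (what is proved, stated in full; the proofs are below) =====
def Claim_equal_get_conflicts_right : Prop := ∀ (nLeft : Int) (adj : List Int) (mapLeft : List Int) (mapRight : List Int), Dom_get_conflicts_right nLeft adj mapLeft mapRight → Pre_get_conflicts_right nLeft adj mapLeft mapRight → Spec_get_conflicts_right nLeft adj mapLeft mapRight (get_conflicts_right nLeft adj mapLeft mapRight)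

-- ===== LEMMAS AND PROOFS =====

-- testBit of an OR-accumulating fold
theorem foldl_or_testBit {α : Type} (L : List α) (P : α → Prop) [DecidablePred P]
    (f : α → Nat) (m k : Nat) :
    (L.foldl (fun acc x => if P x then acc ||| f x else acc) m).testBit k
      = (m.testBit k || L.any (fun x => decide (P x) && (f x).testBit k)) := by
  induction L generalizing m with
  | nil => simp
  | cons x xs ih =>
    by_cases h : P x <;>
      simp [List.foldl_cons, h, ih, Nat.testBit_or, Bool.or_assoc]

-- testBit of a value of the rightMask dict-building fold
theorem getD_rightMask_fold_testBit (L : List (Int × Int)) (d : PySem.Dict Int Nat)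
    (pos : Int) (k : Nat) :
    ((L.foldl (fun d q => d.insert q.2 (d.getD q.2 0 ||| ((1 : Nat) <<< q.1.toNat))) d).getD pos 0).testBit k
      = ((d.getD pos 0).testBit k || L.any (fun q => q.2 == pos && ((1 : Nat) <<< q.1.toNat).testBit k)) := by
  induction L generalizing d with
  | nil => simp
  | cons q L ih =>
    rw [List.foldl_cons, ih, List.any_cons]
    rw [PySem.Dict.getD_insert]
    by_cases h : pos = q.2
    · simp [h, Nat.testBit_or, Bool.or_assoc, Bool.or_comm, Bool.or_left_comm]
    · have : (q.2 == pos) = false := by simp [Ne.symm h]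
      simp [h, this]

theorem testBit_one_shiftLeft (j k : Nat) : ((1 : Nat) <<< j).testBit k = decide (j = k) := by
  simp [Nat.shiftLeft_eq, Nat.testBit_two_pow]

theorem shift_and_eq_testBit (a pos : Nat) : ((a >>> pos) &&& 1 = 1) ↔ a.testBit pos = true := by
  simp [Nat.testBit, Nat.and_comm]

theorem testBit_lt_pyBitLength {a pos : Nat} (h : a.testBit pos = true) : pos < pyBitLength a := by
  by_contra hc
  have hc' : pyBitLength a ≤ pos := Nat.le_of_not_lt hc
  have ha : a < 2 ^ pyBitLength a := by
    unfold pyBitLength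
    split
    · simp_all
    · exact (Nat.log2_lt (by assumption)).mp (Nat.lt_succ_self _)
  have : a < 2 ^ pos := lt_of_lt_of_le ha (Nat.pow_le_pow_right (by norm_num) hc')
  simp [Nat.testBit_lt_two_pow this] at h

-- a value of the rightMask dict, bit by bit: bit k is set iff mapRight[k] = pos
theorem rightMask_testBit (mapRight : List Int) (pos : Int) (k : Nat) :
    ((rightMaskOf mapRight).getD pos 0).testBit k
      = (decide (k < mapRight.length) && decide (mapRight[k]? = some pos)) := by
  rw [rightMaskOf, getD_rightMask_fold_testBit]
  simp only [PySem.Dict.getD_empty, Nat.zero_testBit, Bool.false_or]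
  rw [Bool.eq_iff_iff]
  simp only [List.any_eq_true, Bool.and_eq_true, decide_eq_true_eq, beq_iff_eq]
  constructor
  · rintro ⟨q, hq, h1, h2⟩
    rw [PySem.List.mem_enumerate_iff] at hq
    obtain ⟨j, hj, rfl⟩ := hq
    simp only [testBit_one_shiftLeft, decide_eq_true_eq] at h2
    simp only [Int.zero_add, Int.toNat_natCast] at h2
    subst h2
    exact ⟨hj, by simp [List.getElem?_eq_getElem hj]; exact h1⟩
  · rintro ⟨hk, hget⟩
    refine ⟨((0 : Int) + (k : Int), mapRight[k]), ?_, ?_, ?_⟩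
    · rw [PySem.List.mem_enumerate_iff]; exact ⟨k, hk, rfl⟩
    · simpa [List.getElem?_eq_getElem hk] using hget
    · simp

-- the per-left-vertex masks of A and B agree (a = adj[vL].toNat, nonneg right vertices)
theorem mask_eq (a : Nat) (mapRight : List Int) (hr : ∀ r ∈ mapRight, 0 ≤ r) :
    (PySem.List.enumerate mapRight 0).foldl (fun mask q =>
        if (a >>> q.2.toNat) &&& 1 = 1 then mask ||| ((1 : Nat) <<< q.1.toNat) else mask) (0 : Nat)
      = gatherMask (rightMaskOf mapRight) a := by
  unfold gatherMask
  apply Nat.eq_of_testBit_eq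
  intro k
  rw [foldl_or_testBit (PySem.List.enumerate mapRight 0)
        (fun q => (a >>> q.2.toNat) &&& 1 = 1) (fun q => (1 : Nat) <<< q.1.toNat) 0 k,
      foldl_or_testBit (List.range (pyBitLength a))
        (fun pos => (a >>> pos) &&& 1 = 1)
        (fun pos => (rightMaskOf mapRight).getD (Int.ofNat pos) 0) 0 k]
  simp only [Nat.zero_testBit, Bool.false_or]
  rw [Bool.eq_iff_iff]
  simp only [List.any_eq_true, Bool.and_eq_true, decide_eq_true_eq, List.mem_range]
  constructor
  · rintro ⟨q, hq, h1, h2⟩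
    rw [PySem.List.mem_enumerate_iff] at hq
    obtain ⟨j, hj, rfl⟩ := hq
    simp only [testBit_one_shiftLeft, decide_eq_true_eq, Int.zero_add, Int.toNat_natCast] at h1 h2
    subst h2
    have hbit : a.testBit mapRight[j].toNat = true := (shift_and_eq_testBit _ _).mp h1
    refine ⟨mapRight[j].toNat, testBit_lt_pyBitLength hbit, (shift_and_eq_testBit _ _).mpr hbit, ?_⟩
    rw [rightMask_testBit]
    simp [hj, Int.toNat_of_nonneg (hr _ (List.getElem_mem hj))]
  · rintro ⟨pos, hpos, h1, h2⟩
    rw [rightMask_testBit] at h2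
    simp only [Bool.and_eq_true, decide_eq_true_eq] at h2
    obtain ⟨hk, hget⟩ := h2
    refine ⟨((0 : Int) + (k : Int), mapRight[k]), ?_, ?_, ?_⟩
    · rw [PySem.List.mem_enumerate_iff]; exact ⟨k, hk, rfl⟩
    · have : mapRight[k] = Int.ofNat pos := by
        have := hget; simpa [List.getElem?_eq_getElem hk] using this
      simpa [this] using h1
    · simp

-- writing A's masks into the preallocated zero list, position by position, builds map ++ padding
theorem set_append_eq (pre : List Int) (y : Int) (rest : List Int) (v : Int) :
    (pre ++ y :: rest).set pre.length v = pre ++ v :: rest := by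
  simp [List.set_append_right]

theorem foldl_enumerate_set (f : Int → Int) :
    ∀ (xs pre : List Int) (m : Nat), xs.length ≤ m →
      (PySem.List.enumerate xs (pre.length : Int)).foldl
          (fun acc p => acc.set p.1.toNat (f p.2)) (pre ++ List.replicate m (0 : Int))
        = pre ++ xs.map f ++ List.replicate (m - xs.length) (0 : Int) := by
  intro xs
  induction xs with
  | nil => intro pre m h; simp [PySem.List.enumerate_nil]
  | cons x xs ih =>
    intro pre m h
    rw [PySem.List.enumerate_cons, List.foldl_cons]
    obtain ⟨m', rfl⟩ : ∃ m', m = m' + 1 := ⟨m - 1, by simp at h; omega⟩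
    rw [List.replicate_succ]
    simp only [Int.toNat_natCast]
    rw [set_append_eq]
    have hres : pre ++ f x :: List.replicate m' (0 : Int) = (pre ++ [f x]) ++ List.replicate m' 0 := by
      simp
    have hs : (pre.length : Int) + 1 = ((pre ++ [f x]).length : Int) := by simp
    rw [hres, hs, ih (pre ++ [f x]) m' (by simp at h ⊢; omega)]
    simp

theorem get_conflicts_right_spec : Claim_equal_get_conflicts_right := by
  intro nLeft adj mapLeft mapRight _hdom hpre
  unfold Spec_get_conflicts_right get_conflicts_right get_conflicts_right_alt
  rcases hpre with hnil | ⟨hlen, _hadj, hr⟩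
  · subst hnil; simp [PySem.List.enumerate_nil]
  · have hlen' : mapLeft.length ≤ nLeft.toNat := by omega
    have hstep := PySem.List.foldl_congr_mem
      (l := PySem.List.enumerate mapLeft 0) (init := List.replicate nLeft.toNat (0 : Int))
      (f := fun (acc : List Int) (p : Int × Int) =>
        acc.set p.1.toNat (Int.ofNat ((PySem.List.enumerate mapRight 0).foldl (fun mask q =>
          if ((PySem.List.pyGet? adj p.2).getD 0).toNat >>> q.2.toNat &&& 1 = 1 then
            mask ||| (1 : Nat) <<< q.1.toNat
          else mask) 0)))
      (g := fun (acc : List Int) (p : Int × Int) =>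
        acc.set p.1.toNat ((fun v => Int.ofNat (gatherMask (rightMaskOf mapRight)
          ((PySem.List.pyGet? adj v).getD 0).toNat)) p.2))
      (by intro acc p _; simp only [mask_eq _ _ hr])
    rw [hstep]
    have := foldl_enumerate_set
      (fun v => Int.ofNat (gatherMask (rightMaskOf mapRight) ((PySem.List.pyGet? adj v).getD 0).toNat))
      mapLeft [] nLeft.toNat hlen'
    simp only [List.nil_append, List.length_nil, Int.natCast_zero] at this
    rw [this]
    simp only [List.length_map]
    rw [show (nLeft - (mapLeft.length : Int)).toNat = nLeft.toNat - mapLeft.length by omega]
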